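-- pv_equiv track=rewrite | github.com/chosaihim/jungle_codingTest_study | FEB/13th/조이스틱.py | chooseAlphabet
-- ===== SOURCE A (Python) =====
-- def chooseAlphabet(string,index):
--     n = len(string)
--     if string[index]!='A':
--         return [index,0]
--     for i in range(1,1+n//2):
--         mi,pi = index-i,index+i
--
--         if index-i<0:  mi += n
--         if index+i>=n: pi -= n
--
--         if string[pi] != 'A':
--             return [pi, i]
--         elif string[mi] != 'A':
--             return [mi, i]
--     return [-1,-1]
-- ===== SOURCE B (Python) =====
-- def chooseAlphabet(string, index):
--     n = len(string)
--     if string[index] != 'A':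
--         return [index, 0]
--     # one pass over all positions, keeping the (steps, direction) key that is
--     # lexicographically smallest (forward wins ties, as required)
--     best_key = None
--     best_df = None
--     for p, c in enumerate(string):
--         if c == 'A':
--             continue
--         df = (p - index) % n          # forward offset from index (1..n-1)
--         key = (df, 0) if 2 * df <= n else (n - df, 1)
--         if best_key is None or key < best_key:
--             best_key, best_df = key, df
--     if best_key is None:
--         return [-1, -1]
--     pos = index + best_df             # express the target in the caller's
--     if pos >= n:                      # coordinate (index may be negative),
--         pos -= n                      # wrapping at most once past the end
--     return [pos, best_key[0]]
-- ===== Notes on version B (the rewrite author's own statement) =====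
-- stated objective: alternative
-- what changed: A scans outward from the index at distances 1,2,... in both directions with an early return; B makes one pass over all positions, keeping the position whose (steps, direction) key is lexicographically smallest, and converts the best forward offset back to the caller's index coordinate.
import Mathlib
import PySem

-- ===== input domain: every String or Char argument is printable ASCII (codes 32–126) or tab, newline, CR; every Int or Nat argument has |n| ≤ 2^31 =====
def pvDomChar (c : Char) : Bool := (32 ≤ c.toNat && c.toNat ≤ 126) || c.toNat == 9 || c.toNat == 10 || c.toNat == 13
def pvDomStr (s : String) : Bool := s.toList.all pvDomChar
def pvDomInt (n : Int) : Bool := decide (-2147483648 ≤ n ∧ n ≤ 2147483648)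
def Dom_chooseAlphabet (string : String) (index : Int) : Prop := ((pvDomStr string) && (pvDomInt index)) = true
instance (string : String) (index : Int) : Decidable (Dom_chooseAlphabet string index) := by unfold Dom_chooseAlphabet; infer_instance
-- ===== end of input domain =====

-- B replaces A's outward dual-direction scan (distance 1, 2, … with an early return)
-- by a single pass over all positions that keeps the (steps, direction) key that is
-- lexicographically smallest; same return value on every input where A returns (alternative
-- decomposition, same O(n) cost).

-- ===== PORT A =====
-- the loop 'for i in range(1, 1+n//2)' of A, as structural recursion on the number of
-- remaining iterations; PySem.List.pyGet? returns none exactly where Python raises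
-- IndexError (outside Pre_), ported to the junk value [].
def chooseAlphabetLoop (cs : List Char) (n index : Int) : Nat → Nat → List Int
  | 0, _ => [-1, -1]
  | fuel+1, i =>
    let mi0 : Int := index - i
    let pi0 : Int := index + i
    let mi : Int := if index - (i : Int) < 0 then mi0 + n else mi0
    let pi : Int := if index + (i : Int) ≥ n then pi0 - n else pi0
    match PySem.List.pyGet? cs pi with
    | none => []                                  -- IndexError: outside Pre_
    | some cp =>
      if cp ≠ 'A' then [pi, (i : Int)]
      else
        match PySem.List.pyGet? cs mi with
        | none => []                              -- IndexError: outside Pre_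
        | some cm =>
          if cm ≠ 'A' then [mi, (i : Int)]
          else chooseAlphabetLoop cs n index fuel (i+1)

def chooseAlphabet (string : String) (index : Int) : List Int :=
  let n : Int := PySem.Str.len string
  match PySem.Str.pyGet? string index with
  | none => []                                    -- IndexError: outside Pre_
  | some c =>
    if c ≠ 'A' then [index, 0]
    else chooseAlphabetLoop string.toList n index (PySem.Int.floordiv n 2).toNat 1

-- ===== PORT B =====
-- lexicographic '<' on Python int pairs, written out (Lean's Prod order is not lex)
def pvPairLt (a b : Int × Int) : Bool := a.1 < b.1 || (a.1 == b.1 && a.2 < b.2)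

def chooseAlphabet_alt (string : String) (index : Int) : List Int :=
  let cs := string.toList
  let n : Int := PySem.Str.len string
  match PySem.Str.pyGet? string index with
  | none => []                                    -- IndexError: outside Pre_
  | some c =>
    if c ≠ 'A' then [index, 0]
    else
      let best :=
        (PySem.List.enumerate cs).foldl
          (fun (best : Option ((Int × Int) × Int)) pc =>
            if pc.2 = 'A' then best
            else
              let df := PySem.Int.mod (pc.1 - index) n
              let key : Int × Int := if 2*df ≤ n then (df, 0) else (n - df, 1)
              match best with
              | none => some (key, df)
              | some b => if pvPairLt key b.1 then some (key, df) else some b)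
          none
      match best with
      | none => [-1, -1]
      | some (key, df) =>
        let pos0 := index + df
        let pos := if pos0 ≥ n then pos0 - n else pos0
        [pos, key.1]

-- ===== PRECONDITION & SPEC =====
-- Pre_ = exactly the inputs where A returns: string[index] raises IndexError
-- unless -len(string) ≤ index < len(string) (so the empty string is excluded too).
def Pre_chooseAlphabet (string : String) (index : Int) : Prop :=
  -(PySem.Str.len string) ≤ index ∧ index < PySem.Str.len string
instance (string : String) (index : Int) : Decidable (Pre_chooseAlphabet string index) := by
  unfold Pre_chooseAlphabet; infer_instance

def pvWitness_chooseAlphabet : String × Int := ("BAAB", -2)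

def Spec_chooseAlphabet (string : String) (index : Int) (out : List Int) : Prop :=
  out = chooseAlphabet_alt string index
instance (string : String) (index : Int) (out : List Int) : Decidable (Spec_chooseAlphabet string index out) := by
  unfold Spec_chooseAlphabet; infer_instance

-- ===== CLAIM (what is proved, stated in full; the proofs are below) =====
def Claim_equal_chooseAlphabet : Prop := ∀ (string : String) (index : Int), Dom_chooseAlphabet string index → Pre_chooseAlphabet string index → Spec_chooseAlphabet string index (chooseAlphabet string index)

-- ===== LEMMAS AND PROOFS =====

-- is the character d forward steps (cyclically) from position j a non-'A'?
def pvGd (cs : List Char) (j d : Nat) : Bool := cs.getD ((j + d) % cs.length) 'A' != 'A'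

-- the scan key of forward offset d, encoded as one number 2*steps + direction
def pvKc (n d : Nat) : Nat := if 2*d ≤ n then 2*d else 2*(n-d)+1

-- the forward offset back from an encoded key
def pvDf (n c : Nat) : Nat := if c % 2 = 0 then c/2 else n - c/2

-- encoded keys of all good forward offsets (indexed by offset)
def pvCodes (cs : List Char) (j : Nat) : List Nat :=
  (List.range cs.length).filterMap
    (fun d => if 1 ≤ d ∧ pvGd cs j d = true then some (pvKc cs.length d) else none)

-- encoded keys of the good positions among the first m positions (indexed by position)
def pvPCodes (cs : List Char) (j m : Nat) : List Nat :=
  (List.range m).filterMap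
    (fun p => if cs.getD p 'A' ≠ 'A'
              then some (pvKc cs.length ((p + cs.length - j) % cs.length)) else none)

-- the common answer both programs produce from the minimal encoded key
def pvOut (cs : List Char) (index : Int) (c? : Option Nat) : List Int :=
  match c? with
  | none => [-1, -1]
  | some c =>
    let pos0 : Int := index + (pvDf cs.length c : Int)
    [if pos0 ≥ (cs.length : Int) then pos0 - cs.length else pos0, ((c/2 : Nat) : Int)]

-- B's fold payload for an encoded key
def pvPayload (n c : Nat) : (Int × Int) × Int := (((c/2 : Nat), ((c % 2 : Nat) : Int)), ((pvDf n c : Nat) : Int))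

lemma pv_mod_small (a n : Nat) (h : a < 2*n) :
    a % n = if a < n then a else a - n := by
  split
  · exact Nat.mod_eq_of_lt ‹_›
  · rw [Nat.mod_eq_sub_mod (by omega)]; exact Nat.mod_eq_of_lt (by omega)

lemma pv_pyGet?_small (cs : List Char) (t : Int)
    (h1 : -(cs.length : Int) ≤ t) (h2 : t < (cs.length : Int)) :
    PySem.List.pyGet? cs t =
      some (cs.getD ((if t < 0 then t + cs.length else t)).toNat 'A') := by
  unfold PySem.List.pyGet? PySem.List.pyIdx?
  by_cases h0 : 0 ≤ t
  · rw [if_pos h0, if_pos h2, if_neg (by omega)]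
    simp only [Option.bind]
    rw [List.getElem?_eq_getElem (by omega), List.getD_eq_getElem _ _ (by omega)]
  · rw [if_neg h0, if_pos h1]
    simp only [Option.bind]
    have hk : cs.length - (-t).toNat = (t + cs.length).toNat := by omega
    rw [hk, List.getElem?_eq_getElem (by omega), List.getD_eq_getElem _ _ (by omega)]
    simp only [if_pos (show t < 0 by omega)]

lemma pv_getWrap (cs : List Char) (t : Int) (k : Nat) (hk : k < cs.length)
    (h3 : t = (k : Int) ∨ t = (k : Int) - cs.length) :
    PySem.List.pyGet? cs t = some (cs.getD k 'A') := by
  rw [pv_pyGet?_small cs t (by omega) (by omega)]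
  congr 2
  rcases h3 with rfl | rfl <;> split_ifs <;> omega

lemma pv_dp (n j d : Nat) (hj : j < n) (h1 : 1 ≤ d) (h2 : d < n) :
    ((j + d) % n + n - j) % n = d := by
  rw [pv_mod_small (j+d) n (by omega)]
  split
  · rw [pv_mod_small _ n (by omega)]; split <;> omega
  · rw [pv_mod_small _ n (by omega)]; split <;> omega

lemma pv_pd (n j p : Nat) (hj : j < n) (hp : p < n) (hne : p ≠ j) :
    1 ≤ (p + n - j) % n ∧ (p + n - j) % n < n ∧ (j + (p + n - j) % n) % n = p := by
  rw [pv_mod_small (p+n-j) n (by omega)]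
  split
  · rw [pv_mod_small _ n (by omega)]
    refine ⟨by omega, by omega, ?_⟩; split <;> omega
  · rw [pv_mod_small _ n (by omega)]
    refine ⟨by omega, by omega, ?_⟩; split <;> omega

lemma pv_kc_bounds (n d : Nat) (h1 : 1 ≤ d) (h2 : d < n) :
    2 ≤ pvKc n d ∧ pvKc n d ≤ 2*(n/2)+1 := by
  unfold pvKc; split <;> omega

lemma pv_mem_codes (cs : List Char) (j c : Nat) :
    c ∈ pvCodes cs j ↔ ∃ d, 1 ≤ d ∧ d < cs.length ∧ pvGd cs j d = true ∧ pvKc cs.length d = c := by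
  unfold pvCodes
  simp only [List.mem_filterMap, List.mem_range]
  constructor
  · rintro ⟨d, hd, h⟩
    rw [ite_eq_iff] at h
    rcases h with ⟨⟨h1, h2⟩, h3⟩ | ⟨_, h3⟩
    · exact ⟨d, h1, hd, h2, by simpa using h3⟩
    · simp at h3
  · rintro ⟨d, h1, hd, h2, rfl⟩
    exact ⟨d, hd, by rw [if_pos ⟨h1, h2⟩]⟩

lemma pv_mem_pcodes (cs : List Char) (j m c : Nat) :
    c ∈ pvPCodes cs j m ↔ ∃ p, p < m ∧ cs.getD p 'A' ≠ 'A' ∧ pvKc cs.length ((p + cs.length - j) % cs.length) = c := by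
  unfold pvPCodes
  simp only [List.mem_filterMap, List.mem_range]
  constructor
  · rintro ⟨p, hp, h⟩
    rw [ite_eq_iff] at h
    rcases h with ⟨h1, h3⟩ | ⟨_, h3⟩
    · exact ⟨p, hp, h1, by simpa using h3⟩
    · simp at h3
  · rintro ⟨p, hp, h1, rfl⟩
    exact ⟨p, hp, by rw [if_pos h1]⟩

lemma pv_min?_congr (l1 l2 : List Nat) (h : ∀ x, x ∈ l1 ↔ x ∈ l2) :
    l1.min? = l2.min? := by
  rcases h1 : l1.min? with _ | c
  · rw [List.min?_eq_none_iff] at h1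
    subst h1
    rcases h2 : l2.min? with _ | c
    · rfl
    · exfalso
      have hc := (List.min?_eq_some_iff_subtype.mp h2).1
      simpa using (h c).mpr hc
  · rw [List.min?_eq_some_iff_subtype] at h1
    symm
    rw [List.min?_eq_some_iff_subtype]
    exact ⟨(h c).mp h1.1, fun b hb => h1.2 b ((h b).mpr hb)⟩

-- same keys whether indexed by offset or by position
lemma pv_codes_pcodes (cs : List Char) (j : Nat) (hj : j < cs.length) (hA : cs.getD j 'A' = 'A') :
    (pvCodes cs j).min? = (pvPCodes cs j cs.length).min? := by
  apply pv_min?_congr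
  intro x
  rw [pv_mem_codes, pv_mem_pcodes]
  constructor
  · rintro ⟨d, h1, h2, hgd, rfl⟩
    refine ⟨(j + d) % cs.length, Nat.mod_lt _ (by omega), ?_, ?_⟩
    · simpa [pvGd] using hgd
    · rw [pv_dp _ _ _ hj h1 h2]
  · rintro ⟨p, hp, hne, rfl⟩
    have hpj : p ≠ j := fun h => hne (h ▸ hA)
    obtain ⟨g1, g2, g3⟩ := pv_pd cs.length j p hj hp hpj
    exact ⟨_, g1, g2, by simp [pvGd, g3]; simpa [List.getD] using hne, rfl⟩

lemma pv_gd_false (cs : List Char) (j d : Nat) (h : ¬ pvGd cs j d = true) :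
    cs.getD ((j + d) % cs.length) 'A' = 'A' := by
  simpa [pvGd] using h

-- A's loop returns the output of the minimal remaining encoded key
lemma pv_loopA (cs : List Char) (index : Int) (j : Nat)
    (hj : j < cs.length)
    (hIdx : index = (j : Int) ∨ index = (j : Int) - cs.length)
    (_hA : cs.getD j 'A' = 'A') :
    ∀ fuel i : Nat, 1 ≤ i → i + fuel = cs.length/2 + 1 →
      (∀ c ∈ pvCodes cs j, 2*i ≤ c) →
      chooseAlphabetLoop cs (cs.length : Int) index fuel i = pvOut cs index (pvCodes cs j).min? := by
  intro fuel
  induction fuel with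
  | zero =>
    intro i h1 h2 hinv
    have hmin : (pvCodes cs j).min? = none := by
      rw [List.min?_eq_none_iff, List.eq_nil_iff_forall_not_mem]
      intro c hc
      obtain ⟨d, hd1, hd2, _, rfl⟩ := (pv_mem_codes cs j c).mp hc
      have := pv_kc_bounds cs.length d hd1 hd2
      have := hinv _ hc
      omega
    rw [hmin]
    rfl
  | succ fuel ih =>
    intro i h1 h2 hinv
    have hn : 0 < cs.length := by omega
    have hi2 : 2*i ≤ cs.length := by omega
    have hiln : i < cs.length := by omega
    -- the two probed positions, in canonical coordinates
    have hpg : PySem.List.pyGet? cs (if index + (i : Int) ≥ (cs.length : Int) then (index + i) - cs.length else index + i)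
        = some (cs.getD ((j + i) % cs.length) 'A') := by
      apply pv_getWrap cs _ _ (Nat.mod_lt _ hn)
      rw [pv_mod_small _ _ (by omega)]
      rcases hIdx with rfl | rfl <;> split_ifs <;> push_cast <;> omega
    have hmg : PySem.List.pyGet? cs (if index - (i : Int) < 0 then (index - i) + cs.length else index - i)
        = some (cs.getD ((j + (cs.length - i)) % cs.length) 'A') := by
      apply pv_getWrap cs _ _ (Nat.mod_lt _ hn)
      rw [pv_mod_small _ _ (by omega)]
      rcases hIdx with rfl | rfl <;> split_ifs <;> push_cast <;> omega
    simp only [chooseAlphabetLoop]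
    rw [hpg]
    dsimp only
    by_cases hgi : pvGd cs j i = true
    · -- forward hit at distance i: minimal code is 2*i
      have hne : cs.getD ((j + i) % cs.length) 'A' ≠ 'A' := by simpa [pvGd] using hgi
      rw [if_pos hne]
      have hmem : 2*i ∈ pvCodes cs j := by
        rw [pv_mem_codes]
        exact ⟨i, h1, hiln, hgi, by unfold pvKc; rw [if_pos hi2]⟩
      have hmin : (pvCodes cs j).min? = some (2*i) := by
        rw [List.min?_eq_some_iff_subtype]
        exact ⟨hmem, hinv⟩
      rw [hmin]
      have hdf : pvDf cs.length (2*i) = i := by unfold pvDf; rw [if_pos (by omega)]; omega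
      have hq : (2*i)/2 = i := by omega
      simp only [pvOut, hdf, hq]
    · rw [if_neg (by simpa [List.getD] using pv_gd_false cs j i hgi)]
      rw [hmg]
      dsimp only
      by_cases hgm : pvGd cs j (cs.length - i) = true
      · -- backward hit at distance i: minimal code is 2*i+1
        have h2i : 2*i < cs.length := by
          by_contra hcon
          have : cs.length - i = i := by omega
          rw [this] at hgm
          exact hgi hgm
        have hne : cs.getD ((j + (cs.length - i)) % cs.length) 'A' ≠ 'A' := by simpa [pvGd] using hgm
        rw [if_pos hne]
        have hmem : 2*i+1 ∈ pvCodes cs j := by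
          rw [pv_mem_codes]
          refine ⟨cs.length - i, by omega, by omega, hgm, ?_⟩
          unfold pvKc
          rw [if_neg (by omega)]
          omega
        have hmin : (pvCodes cs j).min? = some (2*i+1) := by
          rw [List.min?_eq_some_iff_subtype]
          refine ⟨hmem, fun c hc => ?_⟩
          have hge := hinv c hc
          obtain ⟨d, hd1, hd2, hgd, rfl⟩ := (pv_mem_codes cs j c).mp hc
          have : pvKc cs.length d ≠ 2*i := by
            unfold pvKc
            split
            · intro h; have : d = i := by omega
              exact hgi (this ▸ hgd)
            · omega
          omega
        rw [hmin]
        have hdf : pvDf cs.length (2*i+1) = cs.length - i := by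
          unfold pvDf
          rw [if_neg (by omega)]
          congr 1
          omega
        have hq : (2*i+1)/2 = i := by omega
        simp only [pvOut, hdf, hq]
        have hcast : ((cs.length - i : Nat) : Int) = (cs.length : Int) - (i : Int) := by omega
        rw [hcast]
        congr 1
        split_ifs <;> omega
      · -- both probes are 'A': no code is 2*i or 2*i+1, recurse with i+1
        rw [if_neg (by simpa [List.getD] using pv_gd_false cs j (cs.length - i) hgm)]
        apply ih (i+1) (by omega) (by omega)
        intro c hc
        have hge := hinv c hc
        obtain ⟨d, hd1, hd2, hgd, rfl⟩ := (pv_mem_codes cs j c).mp hc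
        have hne2i : pvKc cs.length d ≠ 2*i := by
          unfold pvKc
          split
          · intro h; have : d = i := by omega
            exact hgi (this ▸ hgd)
          · omega
        have hne2i1 : pvKc cs.length d ≠ 2*i+1 := by
          unfold pvKc
          split
          · omega
          · intro h
            have : d = cs.length - i := by omega
            exact hgm (this ▸ hgd)
        omega

lemma pv_min?_concat (l : List Nat) (c : Nat) :
    (l ++ [c]).min? = some (match l.min? with | none => c | some b => min b c) := by
  induction l with
  | nil => simp [List.min?_cons]
  | cons x xs ih =>
    rw [List.cons_append, List.min?_cons, List.min?_cons, ih]
    rcases h : xs.min? with _ | b <;> simp [Option.elim]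

lemma pv_int_mod (n j p : Nat) (index : Int) (hj : j < n) (hp : p < n)
    (hIdx : index = (j : Int) ∨ index = (j : Int) - n) :
    PySem.Int.mod ((p : Int) - index) (n : Int) = (((p + n - j) % n : Nat) : Int) := by
  rw [PySem.Int.mod_eq_emod_of_pos (by omega), pv_mod_small _ _ (by omega)]
  rcases hIdx with rfl | rfl
  · by_cases h : p + n - j < n
    · rw [if_pos h]
      have e1 : (p : Int) - j = ((p : Int) - j + n) + (n : Int) * (-1) := by ring
      rw [e1, Int.add_mul_emod_self_left, Int.emod_eq_of_lt (by omega) (by omega)]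
      omega
    · rw [if_neg h, Int.emod_eq_of_lt (by omega) (by omega)]
      omega
  · by_cases h : p + n - j < n
    · rw [if_pos h, Int.emod_eq_of_lt (by omega) (by omega)]
      omega
    · rw [if_neg h]
      have e1 : (p : Int) - ((j : Int) - n) = ((p : Int) - j) + (n : Int) * 1 := by ring
      rw [e1, Int.add_mul_emod_self_left, Int.emod_eq_of_lt (by omega) (by omega)]
      omega

lemma pv_kc_facts (n d : Nat) (h1 : 1 ≤ d) (h2 : d < n) :
    (pvKc n d)/2 = (if 2*d ≤ n then d else n - d) ∧
    (pvKc n d) % 2 = (if 2*d ≤ n then 0 else 1) ∧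
    pvDf n (pvKc n d) = d := by
  unfold pvKc pvDf; split_ifs <;> omega

lemma pv_pairLt_code (a b : Nat) :
    pvPairLt (((a/2 : Nat) : Int), ((a % 2 : Nat) : Int)) (((b/2 : Nat) : Int), ((b % 2 : Nat) : Int)) = true ↔ a < b := by
  simp [pvPairLt]
  omega

lemma pv_pcodes_succ (cs : List Char) (j m : Nat) :
    pvPCodes cs j (m+1) = pvPCodes cs j m ++
      (if cs.getD m 'A' ≠ 'A' then [pvKc cs.length ((m + cs.length - j) % cs.length)] else []) := by
  unfold pvPCodes
  rw [List.range_succ, List.filterMap_append]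
  congr 1
  by_cases h : cs.getD m 'A' ≠ 'A'
  · rw [if_pos h]; simp only [List.filterMap_cons, if_pos h, List.filterMap_nil]
  · rw [if_neg h]; simp only [List.filterMap_cons, if_neg h, List.filterMap_nil]

lemma pv_enum (l : List Char) : ∀ s : Int,
    PySem.List.enumerate l s = (List.range l.length).map (fun (k : Nat) => (s + (k : Int), l.getD k 'A')) := by
  induction l with
  | nil => intro s; rfl
  | cons x xs ih =>
    intro s
    rw [PySem.List.enumerate_cons, ih (s+1), List.length_cons, List.range_succ_eq_map,
        List.map_cons, List.map_map]
    congr 1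
    · simp
    · apply List.map_congr_left
      intro k _
      simp only [Function.comp_apply, List.getD_cons_succ, Prod.ext_iff]
      constructor
      · push_cast; ring
      · trivial

-- B's fold computes the payload of the minimal encoded key of the first m positions
lemma pv_foldB (cs : List Char) (index : Int) (j : Nat)
    (hj : j < cs.length)
    (hIdx : index = (j : Int) ∨ index = (j : Int) - cs.length)
    (hA : cs.getD j 'A' = 'A') :
    ∀ m : Nat, m ≤ cs.length →
      (List.range m).foldl
        (fun (best : Option ((Int × Int) × Int)) (p : Nat) =>
          if cs.getD p 'A' = 'A' then best
          else
            let df := PySem.Int.mod ((p : Int) - index) (cs.length : Int)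
            let key : Int × Int := if 2*df ≤ (cs.length : Int) then (df, 0) else ((cs.length : Int) - df, 1)
            match best with
            | none => some (key, df)
            | some b => if pvPairLt key b.1 then some (key, df) else some b)
        none
      = (pvPCodes cs j m).min?.map (pvPayload cs.length) := by
  intro m
  induction m with
  | zero => intro _; rfl
  | succ m ih =>
    intro hm
    rw [List.range_succ, List.foldl_append, ih (by omega), List.foldl_cons, List.foldl_nil]
    by_cases hc : cs.getD m 'A' = 'A'
    · rw [if_pos hc, pv_pcodes_succ, if_neg (by simpa using hc), List.append_nil]
    · rw [if_neg hc, pv_pcodes_succ, if_pos hc]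
      have hmj : m ≠ j := fun h => hc (h ▸ hA)
      obtain ⟨g1, g2, _⟩ := pv_pd cs.length j m hj (by omega) hmj
      set d := (m + cs.length - j) % cs.length with hd
      obtain ⟨k1, k2, k3⟩ := pv_kc_facts cs.length d g1 g2
      set c := pvKc cs.length d with hcdef
      have hdfeq : PySem.Int.mod ((m : Int) - index) (cs.length : Int) = ((d : Nat) : Int) :=
        pv_int_mod cs.length j m index hj (by omega) hIdx
      dsimp only
      rw [hdfeq]
      have hkey : (if 2*((d : Nat) : Int) ≤ (cs.length : Int) then (((d : Nat) : Int), (0 : Int)) else ((cs.length : Int) - ((d : Nat) : Int), (1 : Int)))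
          = (((c/2 : Nat) : Int), ((c % 2 : Nat) : Int)) := by
        by_cases h2d : 2*d ≤ cs.length
        · rw [if_pos (by exact_mod_cast h2d), k1, k2, if_pos h2d, if_pos h2d]
          simp
        · rw [if_neg (by omega), k1, k2, if_neg h2d, if_neg h2d]
          have : ((cs.length - d : Nat) : Int) = (cs.length : Int) - (d : Nat) := by omega
          rw [this]
          simp
      rw [hkey]
      have hdpay : ((d : Nat) : Int) = ((pvDf cs.length c : Nat) : Int) := by rw [k3]
      rcases hmin : (pvPCodes cs j m).min? with _ | b
      · rw [pv_min?_concat, hmin]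
        simp only [Option.map_some]
        rw [hdpay]
        rfl
      · rw [pv_min?_concat, hmin]
        simp only [Option.map_some]
        dsimp only [pvPayload]
        by_cases hlt : c < b
        · rw [if_pos ((pv_pairLt_code c b).mpr hlt)]
          have : min b c = c := by omega
          rw [this, hdpay]
        · rw [if_neg (by rw [pv_pairLt_code]; omega)]
          have : min b c = b := by omega
          rw [this]

-- the same fold, with the step function in the exact shape left by List.foldl_map
lemma pv_foldB' (cs : List Char) (index : Int) (j : Nat)
    (hj : j < cs.length)
    (hIdx : index = (j : Int) ∨ index = (j : Int) - cs.length)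
    (hA : cs.getD j 'A' = 'A') :
      (List.range cs.length).foldl
        (fun (best : Option ((Int × Int) × Int)) (p : Nat) =>
          if ((0 : Int) + (p : Int), cs.getD p 'A').2 = 'A' then best
          else
            let df := PySem.Int.mod (((0 : Int) + (p : Int), cs.getD p 'A').1 - index) (cs.length : Int)
            let key : Int × Int := if 2*df ≤ (cs.length : Int) then (df, 0) else ((cs.length : Int) - df, 1)
            match best with
            | none => some (key, df)
            | some b => if pvPairLt key b.1 then some (key, df) else some b)
        none
      = (pvPCodes cs j cs.length).min?.map (pvPayload cs.length) := by
  rw [PySem.List.foldl_congr_mem (List.range cs.length) _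
      (fun (best : Option ((Int × Int) × Int)) (p : Nat) =>
          if cs.getD p 'A' = 'A' then best
          else
            let df := PySem.Int.mod ((p : Int) - index) (cs.length : Int)
            let key : Int × Int := if 2*df ≤ (cs.length : Int) then (df, 0) else ((cs.length : Int) - df, 1)
            match best with
            | none => some (key, df)
            | some b => if pvPairLt key b.1 then some (key, df) else some b)
      none ?_]
  · exact pv_foldB cs index j hj hIdx hA cs.length (le_refl _)
  · intro acc p _
    dsimp only
    rw [zero_add]

theorem pv_main (string : String) (index : Int)
    (hPre : Pre_chooseAlphabet string index) :
    chooseAlphabet string index = chooseAlphabet_alt string index := by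
  obtain ⟨hp1, hp2⟩ := hPre
  rw [PySem.Str.len_eq] at hp1 hp2
  set cs := string.toList with hcs
  have hn : 0 < cs.length := by omega
  set j : Nat := (if 0 ≤ index then index.toNat else (index + cs.length).toNat) with hjdef
  have hj : j < cs.length := by rw [hjdef]; split <;> omega
  have hIdx : index = (j : Int) ∨ index = (j : Int) - cs.length := by
    rw [hjdef]; split <;> [left; right] <;> omega
  have hGet : PySem.Str.pyGet? string index = some (cs.getD j 'A') := by
    rw [show PySem.Str.pyGet? string index = PySem.List.pyGet? cs index from rfl]
    exact pv_getWrap cs index j hj hIdx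
  simp only [chooseAlphabet, chooseAlphabet_alt, PySem.Str.len_eq, hGet, ← hcs]
  by_cases hA : cs.getD j 'A' = 'A'
  · simp only [if_neg (show ¬ (cs.getD j 'A' ≠ 'A') from fun hne => hne hA)]
    have hfuel : (PySem.Int.floordiv ((cs.length : Nat) : Int) 2).toNat = cs.length / 2 := by
      rw [show ((2 : Int)) = ((2 : Nat) : Int) from rfl, PySem.Int.floordiv_natCast]
      simp
      omega
    rw [hfuel]
    rw [pv_loopA cs index j hj hIdx hA (cs.length/2) 1 (le_refl 1) (by omega)
      (by
        intro c hc
        obtain ⟨d, hd1, hd2, _, rfl⟩ := (pv_mem_codes cs j c).mp hc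
        have := pv_kc_bounds cs.length d hd1 hd2
        omega)]
    rw [pv_enum cs 0, List.foldl_map, pv_foldB' cs index j hj hIdx hA,
        ← pv_codes_pcodes cs j hj hA]
    rcases hmin : (pvCodes cs j).min? with _ | c
    · rfl
    · rfl
  · simp only [if_pos (show cs.getD j 'A' ≠ 'A' from hA)]

-- ===== VERDICT (by name: the statement is the Claim_ definition above) =====
theorem chooseAlphabet_spec : Claim_equal_chooseAlphabet := by
  intro string index _ hPre
  unfold Spec_chooseAlphabet
  exact pv_main string index hPre
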